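-- pv_equiv track=rewrite | github.com/Minnael/ASSOCIATION-SEQUENCE-RULES | GSP/GSP.py | gsp
-- ===== SOURCE A (Python) =====
-- def eh_subsequencia(candidata, sequencia):
--     """
--     Verifica se 'candidata' é subsequência de 'sequencia'
--     """
--     indice = 0
--
--     for evento in sequencia:
--         if candidata[indice].issubset(evento):
--             indice += 1
--             if indice == len(candidata):
--                 return True
--
--     return False
--
-- def contar_suporte(candidata, base_dados):
--     suporte = 0
--
--     for sequencia in base_dados:
--         if eh_subsequencia(candidata, sequencia):
--             suporte += 1
--
--     return suporte
--
-- def gerar_candidatos(Lk):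
--     """
--     Gera candidatos de tamanho k+1 a partir das sequências frequentes Lk
--     """
--     candidatos = []
--
--     for s1 in Lk:
--         for s2 in Lk:
--             if s1[1:] == s2[:-1]:
--                 nova_sequencia = s1 + [s2[-1]]
--
--                 if nova_sequencia not in candidatos:
--                     candidatos.append(nova_sequencia)
--
--     return candidatos
--
-- def gsp(base_dados, suporte_minimo):
--     # Coleta de todos os itens únicos
--     itens = set()
--     for sequencia in base_dados:
--         for evento in sequencia:
--             itens |= evento
--
--     listas_frequentes = []
--     L1 = []
--     contagem_suporte = {}
--
--     # Sequências de tamanho 1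
--     for item in itens:
--         candidata = [ {item} ]
--         sup = contar_suporte(candidata, base_dados)
--
--         if sup >= suporte_minimo:
--             L1.append(candidata)
--             contagem_suporte[tuple(map(frozenset, candidata))] = sup
--
--     listas_frequentes.append(L1)
--
--     k = 0
--     while listas_frequentes[k]:
--         candidatos = gerar_candidatos(listas_frequentes[k])
--         proximas_frequentes = []
--
--         for candidata in candidatos:
--             sup = contar_suporte(candidata, base_dados)
--
--             if sup >= suporte_minimo:
--                 proximas_frequentes.append(candidata)
--                 contagem_suporte[tuple(map(frozenset, candidata))] = sup
--
--         if not proximas_frequentes: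
--             break
--
--         listas_frequentes.append(proximas_frequentes)
--         k += 1
--
--     return listas_frequentes, contagem_suporte
-- ===== SOURCE B (Python) =====
-- def _eh_subsequencia(candidata, sequencia):
--     # walk the candidate: drop events until one contains the current element
--     pos = 0
--     n = len(sequencia)
--     for c in candidata:
--         while pos < n and not c.issubset(sequencia[pos]):
--             pos += 1
--         if pos == n:
--             return False
--         pos += 1
--     return True
--
--
-- def _suporte(candidata, base_dados):
--     return sum(1 for sequencia in base_dados if _eh_subsequencia(candidata, sequencia))
--
--
-- def _gerar_candidatos(Lk):
--     # index Lk by its (k-1)-prefix once, join each s1 only with the bucket of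
--     # its suffix; dedup with a set of seen keys
--     por_prefixo = {}
--     for s2 in Lk:
--         por_prefixo.setdefault(tuple(map(frozenset, s2[:-1])), []).append(s2)
--
--     candidatos = []
--     vistos = set()
--     for s1 in Lk:
--         for s2 in por_prefixo.get(tuple(map(frozenset, s1[1:])), []):
--             nova_sequencia = s1 + [s2[-1]]
--             chave = tuple(map(frozenset, nova_sequencia))
--             if chave not in vistos:
--                 vistos.add(chave)
--                 candidatos.append(nova_sequencia)
--     return candidatos
--
--
-- def _niveis(Lk, base_dados, suporte_minimo):
--     # recursive staged passes: score all candidates, filter, recurse; the levels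
--     # and the (candidate, support) pairs are built on the way back up
--     if not Lk:
--         return [], []
--     pares = [(c, _suporte(c, base_dados)) for c in _gerar_candidatos(Lk)]
--     frequentes = [(c, s) for c, s in pares if s >= suporte_minimo]
--     if not frequentes:
--         return [], []
--     proximo = [c for c, _ in frequentes]
--     niveis, registros = _niveis(proximo, base_dados, suporte_minimo)
--     return [proximo] + niveis, frequentes + registros
--
--
-- def gsp(base_dados, suporte_minimo):
--     itens = set()
--     for sequencia in base_dados:
--         for evento in sequencia:
--             itens |= evento
--
--     pares1 = [([{i}], _suporte([{i}], base_dados)) for i in itens]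
--     frequentes1 = [(c, s) for c, s in pares1 if s >= suporte_minimo]
--     L1 = [c for c, _ in frequentes1]
--
--     niveis, registros = _niveis(L1, base_dados, suporte_minimo)
--
--     contagem_suporte = {}
--     for c, s in frequentes1 + registros:
--         contagem_suporte[tuple(map(frozenset, c))] = s
--
--     return [L1] + niveis, contagem_suporte
-- ===== Notes on version B (the rewrite author's own statement) =====
-- stated objective: alternative
-- what changed: B stages each GSP level as separate passes (score all candidates with a comprehension, filter the frequent pairs, project the next level) assembled by a recursion that builds the level list and support records on return, generates candidates by a prefix-keyed dict join with set dedup instead of A's all-pairs scan with linear 'not in' search, walks the subsequence test candidate-first with dropped events, and fills the support dict once at the end instead of A's in-loop accumulation.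
import Mathlib
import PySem

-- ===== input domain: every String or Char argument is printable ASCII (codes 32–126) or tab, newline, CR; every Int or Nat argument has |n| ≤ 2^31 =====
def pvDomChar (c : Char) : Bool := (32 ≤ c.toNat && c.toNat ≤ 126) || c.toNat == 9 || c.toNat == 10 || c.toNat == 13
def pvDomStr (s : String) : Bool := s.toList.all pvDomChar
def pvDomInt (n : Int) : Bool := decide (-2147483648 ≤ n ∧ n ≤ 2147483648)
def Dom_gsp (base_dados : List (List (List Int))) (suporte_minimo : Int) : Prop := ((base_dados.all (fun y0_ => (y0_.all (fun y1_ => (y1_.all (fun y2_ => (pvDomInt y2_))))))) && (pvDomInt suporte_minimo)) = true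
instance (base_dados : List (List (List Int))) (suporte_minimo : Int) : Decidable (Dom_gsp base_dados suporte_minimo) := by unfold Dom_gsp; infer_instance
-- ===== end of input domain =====

-- B stages each level as map-score / filter / project passes assembled on recursive return
-- (vs A's single fold with accumulating state), joins candidates through a prefix-keyed
-- index with set dedup, and fills the support dict once at the end; the value is identical.

-- ===== PORT A =====
-- Shared CPython-set model. Python's `itens` is a set of ints and its ITERATION ORDER is
-- observable in the returned lists, so both Pythons (A and B contain the same `itens`
-- lines) are ported through an exact step-for-step model of CPython 3.11 int sets:
-- open addressing, LINEAR_PROBES = 9, PERTURB_SHIFT = 5, initial table 8, resize when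
-- fill*5 >= mask*3, set_merge's big-resize/copy/insert_clean fast paths.  Each event set
-- reaches Python rebuilt by inserting its elements in sorted-by-repr order — exactly the
-- order of the Lean-side list — so building from the given list is exact.
def pyHash (x : Int) : Int := if x = -1 then -2 else x

-- (size_t)hash: the C value reduced mod 2^64 (nonnegative)
def sizeT (h : Int) : Nat := (h.emod (2 ^ 64)).toNat

structure PyIntSet where
  table : List (Option Int)
  mask : Nat
  fill : Nat
  used : Nat
deriving Repr, DecidableEq

def PyIntSet.empty : PyIntSet := ⟨List.replicate 8 none, 7, 0, 0⟩

-- the do-while over slots j, j+1, …, j+probes in set_add_entry: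
-- some (some j) = unused slot j found, some none = key already present, none = block exhausted
def probeBlock (table : List (Option Int)) (key h : Int) : Nat → Nat → Option (Option Nat)
  | j, probes =>
    match (table.getD j none) with
    | none => some (some j)
    | some e =>
      if pyHash e = h ∧ e = key then some none
      else match probes with
        | 0 => none
        | p + 1 => probeBlock table key h (j + 1) p

-- the outer perturb loop of set_add_entry; fuel mask+100 always suffices (once perturb
-- reaches 0 the recurrence i ↦ (5i+1) & mask cycles through every slot and the table
-- always has an empty slot), so the fuel-0 branch is never taken
def addLoop (table : List (Option Int)) (mask : Nat) (key h : Int) : Nat → Nat → Nat → Option Nat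
  | 0, _, _ => some 0
  | fuel + 1, i, perturb =>
    match probeBlock table key h i (if i + 9 ≤ mask then 9 else 0) with
    | some r => r
    | none => addLoop table mask key h fuel ((i * 5 + 1 + (perturb >>> 5)) &&& mask) (perturb >>> 5)

-- set_insert_clean's probe: first slot i, then up to 9 linear slots when i+9 ≤ mask
def cleanBlock (table : List (Option Int)) : Nat → Nat → Option Nat
  | j, probes =>
    match (table.getD j none) with
    | none => some j
    | some _ => match probes with
      | 0 => none
      | p + 1 => cleanBlock table (j + 1) p

def cleanLoop (table : List (Option Int)) (mask : Nat) : Nat → Nat → Nat → Nat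
  | 0, _, _ => 0
  | fuel + 1, i, perturb =>
    match cleanBlock table i (if i + 9 ≤ mask then 9 else 0) with
    | some j => j
    | none => cleanLoop table mask fuel ((i * 5 + 1 + (perturb >>> 5)) &&& mask) (perturb >>> 5)

def PyIntSet.insertClean (s : PyIntSet) (key : Int) : PyIntSet :=
  let h := pyHash key
  let j := cleanLoop s.table s.mask (s.mask + 100) (sizeT h &&& s.mask) (sizeT h)
  ⟨s.table.set j (some key), s.mask, s.fill + 1, s.used + 1⟩

-- newsize = 8; while newsize <= minused: newsize <<= 1   (fuel 64 covers every int here)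
def newSize (minused : Nat) : Nat → Nat → Nat
  | 0, acc => acc
  | f + 1, acc => if acc ≤ minused then newSize minused f (acc * 2) else acc

def PyIntSet.resize (s : PyIntSet) (minused : Nat) : PyIntSet :=
  let ns := newSize minused 64 8
  s.table.foldl (fun t e => match e with | none => t | some k => t.insertClean k)
    ⟨List.replicate ns none, ns - 1, 0, 0⟩

def PyIntSet.add (s : PyIntSet) (key : Int) : PyIntSet :=
  let h := pyHash key
  match addLoop s.table s.mask key h (s.mask + 100) (sizeT h &&& s.mask) (sizeT h) with
  | none => s
  | some j =>
    let s' : PyIntSet := ⟨s.table.set j (some key), s.mask, s.fill + 1, s.used + 1⟩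
    if s'.fill * 5 < s.mask * 3 then s'
    else s'.resize (if s'.used > 50000 then s'.used * 2 else s'.used * 4)

-- iteration order of the set: occupied slots in table order
def PyIntSet.entries (s : PyIntSet) : List Int := s.table.filterMap id

-- set_merge(a, b) for `a |= b` (a and b are distinct objects; no dummies ever arise)
def PyIntSet.merge (a b : PyIntSet) : PyIntSet :=
  if b.used = 0 then a
  else
    let a := if (a.fill + b.used) * 5 ≥ a.mask * 3 then a.resize ((a.used + b.used) * 2) else a
    if a.fill = 0 ∧ a.mask = b.mask ∧ b.fill = b.used then b
    else if a.fill = 0 then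
      b.table.foldl (fun t e => match e with | none => t | some k => t.insertClean k)
        ⟨a.table, a.mask, 0, 0⟩
    else b.entries.foldl PyIntSet.add a

-- set(evento) as the decoder builds it: elements inserted in the given (sorted-by-repr) order
def pySetOfList (xs : List Int) : PyIntSet := xs.foldl PyIntSet.add PyIntSet.empty

-- itens = set(); for sequencia in base: for evento in sequencia: itens |= evento
def pyItens (base_dados : List (List (List Int))) : List Int :=
  (base_dados.foldl (fun acc seq => seq.foldl (fun acc ev => acc.merge (pySetOfList ev)) acc)
    PyIntSet.empty).entries

-- eh_subsequencia: walk sequencia with cursor `indice`, early return True when it hits the end.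
-- candidata[indice] is always in range when this is reached inside gsp (candidates are
-- nonempty and the loop stops at len); `.getD []` only totalises the definition.
def ehSubA (candidata : List (List Int)) : List (List Int) → Nat → Bool
  | [], _ => false
  | evento :: resto, indice =>
    if PySem.Set.issubset (candidata.getD indice []) evento then
      (if indice + 1 = candidata.length then true else ehSubA candidata resto (indice + 1))
    else ehSubA candidata resto indice

def contarSuporteA (candidata : List (List Int)) (base_dados : List (List (List Int))) : Int :=
  base_dados.foldl (fun sup seq => if ehSubA candidata seq 0 then sup + 1 else sup) 0

-- gerar_candidatos. s1[1:] = drop 1, s2[:-1] = dropLast (exact for step-1 slices);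
-- the Python `==`/`in` compare lists of SETS — exact as plain list equality here because
-- every event of every Lk member is a singleton {item}.  s2[-1] is only evaluated on
-- nonempty s2 inside gsp; `.getD []` totalises.
def geraA (Lk : List (List (List Int))) : List (List (List Int)) :=
  Lk.foldl (fun cands s1 =>
    Lk.foldl (fun cands s2 =>
      if s1.drop 1 = s2.dropLast then
        let nova := s1 ++ [(PySem.List.pyGet? s2 (-1)).getD []]
        if nova ∈ cands then cands else cands ++ [nova]
      else cands) cands) []

-- one `while listas_frequentes[k]` iteration per fuel unit; dict keys tuple(map(frozenset, c))
-- are the candidates themselves (singleton events: identical representation)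
def nivelA (base_dados : List (List (List Int))) (suporte_minimo : Int) :
    Nat → List (List (List (List Int))) → List (List (List Int)) →
    PySem.Dict (List (List Int)) Int →
    List (List (List (List Int))) × PySem.Dict (List (List Int)) Int
  | 0, lists, _, dict => (lists, dict)
  | fuel + 1, lists, Lk, dict =>
    if Lk = [] then (lists, dict)
    else
      let st := (geraA Lk).foldl
        (fun st c =>
          let sup := contarSuporteA c base_dados
          if suporte_minimo ≤ sup then (st.1 ++ [c], st.2.insert c sup) else st)
        (([] : List (List (List Int))), dict)
      if st.1 = [] then (lists, st.2)
      else nivelA base_dados suporte_minimo fuel (lists ++ [st.1]) st.1 st.2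

-- fuel: candidates at the k-th level have length k+2, and a candidate longer than every
-- sequence has support 0, so (when suporte_minimo ≥ 1) the while loop runs at most maxLen times
def maxLenGsp (base_dados : List (List (List Int))) : Nat :=
  base_dados.foldl (fun m s => max m s.length) 0

def gsp (base_dados : List (List (List Int))) (suporte_minimo : Int) :
    List (List (List (List Int))) × (List (List (List Int) × Int)) :=
  let itens := pyItens base_dados
  let st1 := itens.foldl
    (fun st item =>
      let candidata : List (List Int) := [[item]]
      let sup := contarSuporteA candidata base_dados
      if suporte_minimo ≤ sup then (st.1 ++ [candidata], st.2.insert candidata sup) else st)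
    (([] : List (List (List Int))), (PySem.Dict.empty : PySem.Dict (List (List Int)) Int))
  let r := nivelA base_dados suporte_minimo (maxLenGsp base_dados + 2) [st1.1] st1.1 st1.2
  (r.1, r.2.items)

-- ===== PORT B =====
-- _eh_subsequencia: for each element of candidata skip events until one contains it
-- (the inner `while pos < n and not issubset` is the dropWhile; `pos == n` is the
-- empty remainder; `pos += 1` steps past the matched event)
def ehSubB : List (List Int) → List (List Int) → Bool
  | [], _ => true
  | c :: cs, seq =>
    match seq.dropWhile (fun evento => !PySem.Set.issubset c evento) with
    | [] => false
    | _ :: resto => ehSubB cs resto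

def contarSuporteB (candidata : List (List Int)) (base_dados : List (List (List Int))) : Int :=
  ((base_dados.countP (fun seq => ehSubB candidata seq) : Nat) : Int)

-- por_prefixo: dict keyed by the (k-1)-prefix (keys tuple(map(frozenset, ·)) are the
-- prefixes themselves: singleton events); setdefault(...).append = getD-then-overwrite
def buildIdx (Lk : List (List (List Int))) :
    PySem.Dict (List (List Int)) (List (List (List Int))) :=
  Lk.foldl (fun d s2 => d.insert s2.dropLast (d.getD s2.dropLast [] ++ [s2])) PySem.Dict.empty

def geraB (Lk : List (List (List Int))) : List (List (List Int)) :=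
  let idx := buildIdx Lk
  (Lk.foldl (fun st s1 =>
      (idx.getD (s1.drop 1) []).foldl (fun st s2 =>
        let nova := s1 ++ [(PySem.List.pyGet? s2 (-1)).getD []]
        if nova ∈ st.2 then st else (st.1 ++ [nova], PySem.Set.add st.2 nova)) st)
    (([] : List (List (List Int))), (PySem.Set.empty : PySem.Set (List (List Int))))).1

-- _niveis: staged passes per level — score every candidate (map), keep the frequent
-- pairs (filter), project the next level (map) — and assemble the list of levels and
-- the (candidate, support) records on the way back up; one recursion step per fuel
-- unit (Source B recurses unboundedly; the fuel passed below suffices, as for A's while)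
def nivelB (base_dados : List (List (List Int))) (suporte_minimo : Int) :
    Nat → List (List (List Int)) →
    List (List (List (List Int))) × List (List (List Int) × Int)
  | 0, _ => ([], [])
  | fuel + 1, Lk =>
    if Lk = [] then ([], [])
    else
      let pares := (geraB Lk).map (fun c => (c, contarSuporteB c base_dados))
      let frequentes := pares.filter (fun p => decide (suporte_minimo ≤ p.2))
      if frequentes = [] then ([], [])
      else
        let proximo := frequentes.map Prod.fst
        let r := nivelB base_dados suporte_minimo fuel proximo
        (proximo :: r.1, frequentes ++ r.2)

def gsp_alt (base_dados : List (List (List Int))) (suporte_minimo : Int) :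
    List (List (List (List Int))) × (List (List (List Int) × Int)) :=
  let itens := pyItens base_dados
  let pares1 := itens.map (fun i => (([[i]] : List (List Int)), contarSuporteB [[i]] base_dados))
  let frequentes1 := pares1.filter (fun p => decide (suporte_minimo ≤ p.2))
  let L1 := frequentes1.map Prod.fst
  let r := nivelB base_dados suporte_minimo (maxLenGsp base_dados + 2) L1
  (L1 :: r.1,
   ((frequentes1 ++ r.2).foldl (fun d p => d.insert p.1 p.2)
     (PySem.Dict.empty : PySem.Dict (List (List Int)) Int)).items)

-- ===== PRECONDITION & SPEC =====
-- no Pre_: both ports are total and agree on every input (Python A diverges when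
-- suporte_minimo < 1 and some item exists; the ports are fuel-bounded and still equal there)
def Spec_gsp (base_dados : List (List (List Int))) (suporte_minimo : Int) (out : List (List (List (List Int))) × (List (List (List Int) × Int))) : Prop := out = gsp_alt base_dados suporte_minimo
instance (base_dados : List (List (List Int))) (suporte_minimo : Int) (out : List (List (List (List Int))) × (List (List (List Int) × Int))) : Decidable (Spec_gsp base_dados suporte_minimo out) := by unfold Spec_gsp; infer_instance

-- ===== CLAIM (what is proved, stated in full; the proofs are below) =====
def Claim_equal_gsp : Prop := ∀ (base_dados : List (List (List Int))) (suporte_minimo : Int), Dom_gsp base_dados suporte_minimo → Spec_gsp base_dados suporte_minimo (gsp base_dados suporte_minimo)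

-- ===== LEMMAS AND PROOFS =====

theorem ehSub_eq (seq : List (List Int)) : ∀ (cand : List (List Int)) (i : Nat),
    i < cand.length → ehSubA cand seq i = ehSubB (cand.drop i) seq := by
  induction seq with
  | nil =>
    intro cand i h
    obtain ⟨c, cs, hc⟩ : ∃ c cs, cand.drop i = c :: cs := ⟨_, _, List.drop_eq_getElem_cons h⟩
    rw [hc]
    simp [ehSubA, ehSubB]
  | cons ev resto ih =>
    intro cand i h
    rw [List.drop_eq_getElem_cons h]
    simp only [ehSubA, List.getD, List.getElem?_eq_getElem h, Option.getD_some]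
    by_cases hsub : PySem.Set.issubset cand[i] ev
    · have hB : ehSubB (cand[i] :: cand.drop (i + 1)) (ev :: resto)
          = ehSubB (cand.drop (i + 1)) resto := by
        simp [ehSubB, hsub]
      rw [if_pos hsub, hB]
      by_cases hlen : i + 1 = cand.length
      · rw [if_pos hlen]
        have hnil : cand.drop (i + 1) = [] := by simp [hlen]
        rw [hnil]
        simp [ehSubB]
      · rw [if_neg hlen, ih cand (i + 1) (by omega)]
    · have hB : ehSubB (cand[i] :: cand.drop (i + 1)) (ev :: resto)
          = ehSubB (cand[i] :: cand.drop (i + 1)) resto := by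
        simp only [ehSubB, List.dropWhile_cons, hsub]
        simp
      rw [if_neg hsub, hB, ih cand i h, List.drop_eq_getElem_cons h]

theorem contar_eq (cand : List (List Int)) (base : List (List (List Int))) (h : cand ≠ []) :
    contarSuporteA cand base = contarSuporteB cand base := by
  unfold contarSuporteA contarSuporteB
  rw [PySem.List.foldl_if_add_one]
  have hcongr : ∀ seq : List (List Int), ehSubA cand seq 0 = ehSubB cand seq := by
    intro seq
    have := ehSub_eq seq cand 0 (by cases cand with | nil => exact absurd rfl h | cons a l => simp)
    simpa using this
  have : base.countP (fun seq => ehSubA cand seq 0) = base.countP (fun seq => ehSubB cand seq) := by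
    apply List.countP_congr
    intro s _
    rw [hcongr]
  simp [this]

-- grouping: the prefix index holds, per key, exactly the members of Lk with that prefix
theorem buildIdx_getD (Lk : List (List (List Int))) (p : List (List Int)) :
    (buildIdx Lk).getD p [] = Lk.filter (fun s2 => decide (s2.dropLast = p)) := by
  suffices h : ∀ (L : List (List (List Int))) (d : PySem.Dict (List (List Int)) (List (List (List Int)))),
      (L.foldl (fun d s2 => d.insert s2.dropLast (d.getD s2.dropLast [] ++ [s2])) d).getD p []
        = d.getD p [] ++ L.filter (fun s2 => decide (s2.dropLast = p)) by
    simpa [buildIdx] using h Lk PySem.Dict.empty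
  intro L
  induction L with
  | nil => simp
  | cons s2 rest ih =>
    intro d
    simp only [List.foldl_cons, ih, List.filter_cons]
    rw [PySem.Dict.getD_insert]
    by_cases hp : s2.dropLast = p
    · simp [hp]
    · simp [hp, Ne.symm hp]

-- the inner A-fold with its guard is the unguarded fold over the indexed bucket,
-- and the B state (cands, vistos) mirrors A's cands with vistos = its members
theorem inner_eq (s1 : List (List Int)) :
    ∀ (m : List (List (List Int))) (accA : List (List (List Int)))
      (st : List (List (List Int)) × PySem.Set (List (List Int))),
      st.1 = accA → (∀ x, x ∈ st.2 ↔ x ∈ accA) →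
      (m.foldl (fun cands s2 =>
          let nova := s1 ++ [(PySem.List.pyGet? s2 (-1)).getD []]
          if nova ∈ cands then cands else cands ++ [nova]) accA
        = (m.foldl (fun st s2 =>
            let nova := s1 ++ [(PySem.List.pyGet? s2 (-1)).getD []]
            if nova ∈ st.2 then st else (st.1 ++ [nova], PySem.Set.add st.2 nova)) st).1)
      ∧ (∀ x, x ∈ (m.foldl (fun st s2 =>
            let nova := s1 ++ [(PySem.List.pyGet? s2 (-1)).getD []]
            if nova ∈ st.2 then st else (st.1 ++ [nova], PySem.Set.add st.2 nova)) st).2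
          ↔ x ∈ m.foldl (fun cands s2 =>
          let nova := s1 ++ [(PySem.List.pyGet? s2 (-1)).getD []]
          if nova ∈ cands then cands else cands ++ [nova]) accA) := by
  intro m
  induction m with
  | nil => intro accA st h1 h2; simp [h1, h2]
  | cons s2 rest ih =>
    intro accA st h1 h2
    simp only [List.foldl_cons]
    by_cases hmem : (s1 ++ [(PySem.List.pyGet? s2 (-1)).getD []]) ∈ accA
    · have hmem2 : (s1 ++ [(PySem.List.pyGet? s2 (-1)).getD []]) ∈ st.2 := (h2 _).mpr hmem
      simp only [hmem, hmem2, if_pos]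
      exact ih accA st h1 h2
    · have hmem2 : (s1 ++ [(PySem.List.pyGet? s2 (-1)).getD []]) ∉ st.2 := fun hx => hmem ((h2 _).mp hx)
      simp only [hmem, hmem2, if_neg, not_false_iff]
      apply ih
      · simp [h1]
      · intro x
        rw [PySem.Set.mem_add]
        simp [h2 x, or_comm]

theorem gera_eq (Lk : List (List (List Int))) : geraA Lk = geraB Lk := by
  unfold geraA geraB
  suffices h : ∀ (L : List (List (List Int))) (accA : List (List (List Int)))
      (st : List (List (List Int)) × PySem.Set (List (List Int))),
      st.1 = accA → (∀ x, x ∈ st.2 ↔ x ∈ accA) →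
      (L.foldl (fun cands s1 =>
          Lk.foldl (fun cands s2 =>
            if s1.drop 1 = s2.dropLast then
              let nova := s1 ++ [(PySem.List.pyGet? s2 (-1)).getD []]
              if nova ∈ cands then cands else cands ++ [nova]
            else cands) cands) accA
        = (L.foldl (fun st s1 =>
            ((buildIdx Lk).getD (s1.drop 1) []).foldl (fun st s2 =>
              let nova := s1 ++ [(PySem.List.pyGet? s2 (-1)).getD []]
              if nova ∈ st.2 then st else (st.1 ++ [nova], PySem.Set.add st.2 nova)) st) st).1)
      ∧ (∀ x, x ∈ (L.foldl (fun st s1 =>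
            ((buildIdx Lk).getD (s1.drop 1) []).foldl (fun st s2 =>
              let nova := s1 ++ [(PySem.List.pyGet? s2 (-1)).getD []]
              if nova ∈ st.2 then st else (st.1 ++ [nova], PySem.Set.add st.2 nova)) st) st).2
          ↔ x ∈ L.foldl (fun cands s1 =>
          Lk.foldl (fun cands s2 =>
            if s1.drop 1 = s2.dropLast then
              let nova := s1 ++ [(PySem.List.pyGet? s2 (-1)).getD []]
              if nova ∈ cands then cands else cands ++ [nova]
            else cands) cands) accA) by
    exact (h Lk [] ([], PySem.Set.empty) rfl (by simp [PySem.Set.empty])).1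
  intro L
  induction L with
  | nil => intro accA st h1 h2; simp [h1, h2]
  | cons s1 rest ih =>
    intro accA st h1 h2
    simp only [List.foldl_cons]
    have hbucket :
        Lk.foldl (fun cands s2 =>
            if s1.drop 1 = s2.dropLast then
              let nova := s1 ++ [(PySem.List.pyGet? s2 (-1)).getD []]
              if nova ∈ cands then cands else cands ++ [nova]
            else cands) accA
          = ((buildIdx Lk).getD (s1.drop 1) []).foldl (fun cands s2 =>
              let nova := s1 ++ [(PySem.List.pyGet? s2 (-1)).getD []]
              if nova ∈ cands then cands else cands ++ [nova]) accA := by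
      rw [buildIdx_getD, List.foldl_filter]
      apply PySem.List.foldl_congr_mem
      intro acc x _
      simp only [decide_eq_true_eq]
      by_cases hd : s1.drop 1 = x.dropLast
      · rw [if_pos hd, if_pos hd.symm]
      · rw [if_neg hd, if_neg (fun h : x.dropLast = s1.drop 1 => hd h.symm)]
    rw [hbucket]
    have hin := inner_eq s1 ((buildIdx Lk).getD (s1.drop 1) []) accA st h1 h2
    exact ih _ _ hin.1.symm (fun x => (hin.2 x).trans (by rw [hin.1]))

theorem gera_ne_nil (Lk : List (List (List Int))) : ∀ c ∈ geraA Lk, c ≠ [] := by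
  unfold geraA
  suffices h : ∀ (L : List (List (List Int))) (acc : List (List (List Int))),
      (∀ c ∈ acc, c ≠ []) →
      ∀ c ∈ L.foldl (fun cands s1 =>
        Lk.foldl (fun cands s2 =>
          if s1.drop 1 = s2.dropLast then
            let nova := s1 ++ [(PySem.List.pyGet? s2 (-1)).getD []]
            if nova ∈ cands then cands else cands ++ [nova]
          else cands) cands) acc, c ≠ [] by
    exact h Lk [] (by simp)
  have hinner : ∀ (s1 : List (List Int)) (M : List (List (List Int))) (acc : List (List (List Int))),
      (∀ c ∈ acc, c ≠ []) →
      ∀ c ∈ M.foldl (fun cands s2 =>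
          if s1.drop 1 = s2.dropLast then
            let nova := s1 ++ [(PySem.List.pyGet? s2 (-1)).getD []]
            if nova ∈ cands then cands else cands ++ [nova]
          else cands) acc, c ≠ [] := by
    intro s1 M
    induction M with
    | nil => intro acc h c hc; exact h c hc
    | cons s2 rest ih =>
      intro acc h c hc
      refine ih _ ?_ c hc
      intro d hd
      beta_reduce at hd
      by_cases h1 : s1.drop 1 = s2.dropLast
      · rw [if_pos h1] at hd
        by_cases h2 : (s1 ++ [(PySem.List.pyGet? s2 (-1)).getD []]) ∈ acc
        · rw [if_pos h2] at hd; exact h d hd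
        · rw [if_neg h2] at hd
          rcases List.mem_append.mp hd with h' | h'
          · exact h d h'
          · simp only [List.mem_singleton] at h'
            subst h'
            simp
      · rw [if_neg h1] at hd; exact h d hd
  intro L
  induction L with
  | nil => intro acc h c hc; exact h c hc
  | cons s1 rest ih =>
    intro acc h c hc
    exact ih _ (hinner s1 Lk acc h) c hc

-- the frequent (candidate, support) pairs of one level, scored with A's counter
def freqA (base : List (List (List Int))) (m : Int) (cs : List (List (List Int))) :
    List (List (List Int) × Int) :=
  (cs.map (fun c => (c, contarSuporteA c base))).filter (fun p => decide (m ≤ p.2))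

-- A's accumulating per-level fold, characterised as B's staged passes
theorem level_fold (base : List (List (List Int))) (m : Int) :
    ∀ (cs : List (List (List Int))) (acc : List (List (List Int)))
      (dict : PySem.Dict (List (List Int)) Int),
      cs.foldl (fun st c =>
          let sup := contarSuporteA c base
          if m ≤ sup then (st.1 ++ [c], st.2.insert c sup) else st) (acc, dict)
        = (acc ++ (freqA base m cs).map Prod.fst,
           (freqA base m cs).foldl (fun d p => d.insert p.1 p.2) dict) := by
  intro cs
  induction cs with
  | nil => intro acc dict; simp [freqA]
  | cons c rest ih =>
    intro acc dict
    simp only [List.foldl_cons, freqA, List.map_cons, List.filter_cons]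
    by_cases hc : m ≤ contarSuporteA c base
    · simp only [hc, decide_true, if_true, ih]
      simp [freqA, List.append_assoc]
    · simp only [hc, decide_false, if_false, ih]
      simp [freqA]

-- the level fold with B's counter equals it with A's on nonempty candidates
theorem freq_congr (base : List (List (List Int))) (m : Int) (cs : List (List (List Int)))
    (h : ∀ c ∈ cs, c ≠ []) :
    (cs.map (fun c => (c, contarSuporteB c base))).filter (fun p => decide (m ≤ p.2))
      = freqA base m cs := by
  unfold freqA
  congr 1
  apply List.map_congr_left
  intro c hc
  rw [contar_eq c base (h c hc)]

theorem freqA_fst_ne_nil (base : List (List (List Int))) (m : Int)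
    (cs : List (List (List Int))) (h : ∀ c ∈ cs, c ≠ []) :
    ∀ c ∈ (freqA base m cs).map Prod.fst, c ≠ [] := by
  intro c hc
  obtain ⟨p, hp, hpc⟩ := List.mem_map.mp hc
  obtain ⟨c', hc', hcc⟩ := List.mem_map.mp (List.mem_filter.mp hp).1
  subst hpc
  rw [← hcc]
  exact h c' hc'

theorem nivel_eq (base : List (List (List Int))) (m : Int) : ∀ (fuel : Nat)
    (lists : List (List (List (List Int)))) (Lk : List (List (List Int)))
    (dict : PySem.Dict (List (List Int)) Int), (∀ c ∈ Lk, c ≠ []) →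
    nivelA base m fuel lists Lk dict
      = (lists ++ (nivelB base m fuel Lk).1,
         (nivelB base m fuel Lk).2.foldl (fun d p => d.insert p.1 p.2) dict) := by
  intro fuel
  induction fuel with
  | zero => intro lists Lk dict _; simp [nivelA, nivelB]
  | succ fuel ih =>
    intro lists Lk dict hne
    simp only [nivelA, nivelB]
    by_cases hLk : Lk = []
    · simp [hLk]
    · rw [if_neg hLk, if_neg hLk]
      rw [← gera_eq, freq_congr base m (geraA Lk) (gera_ne_nil Lk), level_fold]
      simp only [List.nil_append]
      by_cases hf : freqA base m (geraA Lk) = []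
      · rw [hf]
        simp
      · rw [if_neg (by simpa using hf), if_neg hf]
        rw [ih _ _ _ (freqA_fst_ne_nil base m (geraA Lk) (gera_ne_nil Lk))]
        rw [List.foldl_append]
        simp [List.append_assoc]

-- ===== VERDICT (by name: the statement is the Claim_ definition above) =====
theorem gsp_spec : Claim_equal_gsp := by
  intro base_dados suporte_minimo _
  unfold Spec_gsp gsp gsp_alt
  simp only []
  have hA1 :
      (pyItens base_dados).foldl (fun st item =>
          let candidata : List (List Int) := [[item]]
          let sup := contarSuporteA candidata base_dados
          if suporte_minimo ≤ sup then (st.1 ++ [candidata], st.2.insert candidata sup) else st)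
        (([] : List (List (List Int))), (PySem.Dict.empty : PySem.Dict (List (List Int)) Int))
      = (((pyItens base_dados).map (fun i => ([[i]] : List (List Int)))).foldl (fun st c =>
          let sup := contarSuporteA c base_dados
          if suporte_minimo ≤ sup then (st.1 ++ [c], st.2.insert c sup) else st)
        (([] : List (List (List Int))), (PySem.Dict.empty : PySem.Dict (List (List Int)) Int))) := by
    rw [List.foldl_map]
  rw [hA1, level_fold]
  have hB1 :
      ((pyItens base_dados).map
          (fun i => (([[i]] : List (List Int)), contarSuporteB [[i]] base_dados))).filter
          (fun p => decide (suporte_minimo ≤ p.2))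
        = freqA base_dados suporte_minimo
            ((pyItens base_dados).map (fun i => ([[i]] : List (List Int)))) := by
    rw [← freq_congr base_dados suporte_minimo _ (by
      intro c hc
      obtain ⟨i, _, hi⟩ := List.mem_map.mp hc
      rw [← hi]; simp)]
    simp [Function.comp_def]
  rw [hB1]
  simp only [List.nil_append]
  rw [nivel_eq base_dados suporte_minimo _ _ _ _
    (freqA_fst_ne_nil base_dados suporte_minimo _ (by
      intro c hc
      obtain ⟨i, _, hi⟩ := List.mem_map.mp hc
      rw [← hi]
      simp))]
  rw [List.foldl_append]
  simp
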